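-- pv_equiv track=rewrite | github.com/yingl/LintCodeInPython | sliding_window_unique_elements_sum.py | slidingWindowUniqueElementsSum
-- ===== SOURCE A (Python) =====
-- def slidingWindowUniqueElementsSum(nums, k):
--     # write your code here
--     ret = 0
--     uniques = 0
--     di = {}
--     window_size = k
--     if k > len(nums):
--         window_size = len(nums)
--     # 初始化窗口
--     for i in range(0, window_size):
--         if nums[i] not in di:
--             di[nums[i]] = 1
--             uniques += 1
--         else:
--             if di[nums[i]] == 1:
--                 uniques -= 1
--             di[nums[i]] += 1
--     ret += uniques
--     for i in range(k, len(nums)):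
--         prev_num = nums[i - k]
--         di[prev_num] -= 1
--         if di[prev_num] == 1: # 上一个数字从不unique因为滑动再次unique
--             uniques += 1
--         elif di[prev_num] == 0: # 上一个数字因为unique滑动出去没有了
--             uniques -= 1
--         if (nums[i] not in di) or (di[nums[i]] == 0): # 新滑动进来的数字符合unique条件
--             di[nums[i]] = 1
--             uniques += 1
--         else:
--             if di[nums[i]] == 1: # 新滑动进来的数字从unique变成不符合条件
--                 uniques -= 1
--             di[nums[i]] += 1
--         ret += uniques
--     return ret
-- ===== SOURCE B (Python) =====
-- def slidingWindowUniqueElementsSum(nums, k):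
--     n = len(nums)
--     wl = min(k, n)
--     total = 0
--     for s in range(n - wl + 1):
--         counts = {}
--         for x in nums[s:s+wl]:
--             counts[x] = counts.get(x, 0) + 1
--         total += sum(1 for v in counts.values() if v == 1)
--     return total
-- ===== Notes on version B (the rewrite author's own statement) =====
-- stated objective: simpler
-- what changed: Replaced A's incremental O(1)-per-slide maintenance of a shared count dict and uniques counter by an independent recomputation of each window: build a fresh frequency map per window and add the number of keys with frequency exactly 1.
import Mathlib
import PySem

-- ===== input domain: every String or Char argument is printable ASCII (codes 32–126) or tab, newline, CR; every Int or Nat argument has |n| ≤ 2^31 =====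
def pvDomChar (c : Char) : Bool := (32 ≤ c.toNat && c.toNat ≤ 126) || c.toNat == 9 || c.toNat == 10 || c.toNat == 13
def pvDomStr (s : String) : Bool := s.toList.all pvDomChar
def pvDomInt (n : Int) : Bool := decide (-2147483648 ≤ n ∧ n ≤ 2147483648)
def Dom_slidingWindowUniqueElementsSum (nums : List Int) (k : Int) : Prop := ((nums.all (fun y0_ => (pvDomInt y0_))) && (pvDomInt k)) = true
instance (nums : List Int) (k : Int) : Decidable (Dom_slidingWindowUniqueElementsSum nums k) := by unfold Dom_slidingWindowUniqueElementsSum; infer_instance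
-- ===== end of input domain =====

-- B replaces A's incremental sliding maintenance by an independent per-window recomputation
-- (simpler to read; not faster). Equal return value proved on Pre_ (k ≥ 1, or empty nums with k = 0).

-- ===== PORT A =====
-- body of A's initialisation loop, applied to the current element nums[i]
def swuInit (st : Int × PySem.Dict Int Int) (v : Int) : Int × PySem.Dict Int Int :=
  if st.2.contains v = false then
    (st.1 + 1, st.2.insert v 1)
  else
    ((if st.2.getD v 0 = 1 then st.1 - 1 else st.1), st.2.insert v (st.2.getD v 0 + 1))

-- body of A's sliding loop; state (ret, uniques, di)
def swuStep (nums : List Int) (k : Int) (st : Int × Int × PySem.Dict Int Int) (i : Int) :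
    Int × Int × PySem.Dict Int Int :=
  let prev := PySem.List.pyGetD nums (i - k) 0
  let di1 := st.2.2.insert prev (st.2.2.getD prev 0 - 1)
  let u1 := if di1.getD prev 0 = 1 then st.2.1 + 1
            else if di1.getD prev 0 = 0 then st.2.1 - 1 else st.2.1
  let v := PySem.List.pyGetD nums i 0
  if di1.contains v = false ∨ di1.getD v 0 = 0 then
    (st.1 + (u1 + 1), u1 + 1, di1.insert v 1)
  else
    ((st.1 + (if di1.getD v 0 = 1 then u1 - 1 else u1)),
     (if di1.getD v 0 = 1 then u1 - 1 else u1),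
     di1.insert v (di1.getD v 0 + 1))

def slidingWindowUniqueElementsSum (nums : List Int) (k : Int) : Int :=
  let window_size : Int := if k > (nums.length : Int) then (nums.length : Int) else k
  let s1 := (PySem.List.pyRange 0 window_size 1).foldl
      (fun st i => swuInit st (PySem.List.pyGetD nums i 0)) (0, PySem.Dict.empty)
  let s2 := (PySem.List.pyRange k (nums.length : Int) 1).foldl (swuStep nums k)
      (s1.1, s1.1, s1.2)
  s2.1

-- ===== PORT B =====
-- unique-element count of one window, via a fresh frequency dict
def swuWindow (w : List Int) : Int :=
  let counts := w.foldl (fun (d : PySem.Dict Int Int) x => d.insert x (d.getD x 0 + 1))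
      PySem.Dict.empty
  counts.values.foldl (fun acc v => if v = 1 then acc + 1 else acc) 0

def slidingWindowUniqueElementsSum_alt (nums : List Int) (k : Int) : Int :=
  let n : Int := (nums.length : Int)
  let wl : Int := if k ≤ n then k else n
  (PySem.List.pyRange 0 (n - wl + 1) 1).foldl
    (fun total s => total + swuWindow (PySem.List.slice nums (some s) (some (s + wl)))) 0

-- ===== PRECONDITION & SPEC =====
-- Pre_ excludes k ≤ 0 (except the empty list with k = 0, which A accepts): on those inputs
-- A raises KeyError or IndexError in its sliding loop, returning no value.
def Pre_slidingWindowUniqueElementsSum (nums : List Int) (k : Int) : Prop :=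
  1 ≤ k ∨ (nums = [] ∧ k = 0)
instance (nums : List Int) (k : Int) : Decidable (Pre_slidingWindowUniqueElementsSum nums k) := by
  unfold Pre_slidingWindowUniqueElementsSum; infer_instance

def pvWitness_slidingWindowUniqueElementsSum : List Int × Int := ([1, 2, 1, 3, 3], 2)

def Spec_slidingWindowUniqueElementsSum (nums : List Int) (k : Int) (out : Int) : Prop :=
  out = slidingWindowUniqueElementsSum_alt nums k
instance (nums : List Int) (k : Int) (out : Int) :
    Decidable (Spec_slidingWindowUniqueElementsSum nums k out) := by
  unfold Spec_slidingWindowUniqueElementsSum; infer_instance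

-- ===== CLAIM (what is proved, stated in full; the proofs are below) =====
def Claim_equal_slidingWindowUniqueElementsSum : Prop :=
  ∀ (nums : List Int) (k : Int), Dom_slidingWindowUniqueElementsSum nums k →
    Pre_slidingWindowUniqueElementsSum nums k →
    Spec_slidingWindowUniqueElementsSum nums k (slidingWindowUniqueElementsSum nums k)

-- ===== LEMMAS AND PROOFS =====

-- the specification value: number of elements occurring exactly once in w
def uC (w : List Int) : Int := ((w.toFinset.filter (fun x => w.count x = 1)).card : Int)

-- the window of the k elements of nums that precede index i
def swuWin (nums : List Int) (k i : Int) : List Int :=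
  PySem.List.slice nums (some (i - k)) (some i)

lemma uC_perm {l l' : List Int} (h : l.Perm l') : uC l = uC l' := by
  unfold uC
  rw [List.toFinset_eq_of_perm _ _ h]
  congr 2
  apply Finset.filter_congr
  intro x _
  simp [h.count_eq]

lemma uC_append_singleton (t : List Int) (a : Int) :
    uC (t ++ [a]) = uC t + (if t.count a = 0 then 1 else if t.count a = 1 then -1 else 0) := by
  unfold uC
  have hts : (t ++ [a]).toFinset = insert a t.toFinset := by
    ext x; simp [List.mem_toFinset]
  have hcnt : ∀ x, (t ++ [a]).count x = t.count x + (if x = a then 1 else 0) := by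
    intro x; by_cases h : x = a
    · subst h; simp [List.count_append]
    · simp [List.count_append, h, List.count_singleton]; omega
  by_cases h0 : t.count a = 0
  · have ha : a ∉ t.toFinset := by
      simp [List.mem_toFinset]; exact List.count_eq_zero.mp h0
    have : ((t ++ [a]).toFinset.filter (fun x => (t ++ [a]).count x = 1))
        = insert a (t.toFinset.filter (fun x => t.count x = 1)) := by
      ext x
      simp only [hts, Finset.mem_filter, Finset.mem_insert, hcnt]
      constructor
      · rintro ⟨hx | hx, hc⟩
        · exact Or.inl hx
        · right; refine ⟨hx, ?_⟩
          have hxa : x ≠ a := by rintro rfl; exact ha hx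
          simpa [hxa] using hc
      · rintro (rfl | ⟨hx, hc⟩)
        · exact ⟨Or.inl rfl, by simp [h0]⟩
        · have hxa : x ≠ a := by rintro rfl; exact ha hx
          exact ⟨Or.inr hx, by simpa [hxa] using hc⟩
    rw [this, Finset.card_insert_of_notMem (by simp [ha])]
    simp [h0]
  · by_cases h1 : t.count a = 1
    · have ha : a ∈ t.toFinset.filter (fun x => t.count x = 1) := by
        rw [Finset.mem_filter, List.mem_toFinset]
        have hmem : a ∈ t := List.count_pos_iff.mp (by omega)
        exact ⟨hmem, h1⟩
      have : ((t ++ [a]).toFinset.filter (fun x => (t ++ [a]).count x = 1))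
          = (t.toFinset.filter (fun x => t.count x = 1)).erase a := by
        ext x
        simp only [hts, Finset.mem_filter, Finset.mem_insert, Finset.mem_erase, hcnt]
        constructor
        · rintro ⟨hx | hx, hc⟩
          · subst hx; simp [h1] at hc
          · have hxa : x ≠ a := by rintro rfl; simp [h1] at hc
            exact ⟨hxa, hx, by simpa [hxa] using hc⟩
        · rintro ⟨hxa, hx, hc⟩
          exact ⟨Or.inr hx, by simpa [hxa] using hc⟩
      rw [this, Finset.card_erase_of_mem ha]
      have hpos : 0 < (t.toFinset.filter (fun x => t.count x = 1)).card :=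
        Finset.card_pos.mpr ⟨a, ha⟩
      simp [h0, h1]
      omega
    · have : ((t ++ [a]).toFinset.filter (fun x => (t ++ [a]).count x = 1))
          = t.toFinset.filter (fun x => t.count x = 1) := by
        ext x
        simp only [hts, Finset.mem_filter, Finset.mem_insert, hcnt]
        constructor
        · rintro ⟨hx | hx, hc⟩
          · subst hx; simp at hc; omega
          · have hxa : x ≠ a := by rintro rfl; simp at hc; omega
            exact ⟨hx, by simpa [hxa] using hc⟩
        · rintro ⟨hx, hc⟩
          have hxa : x ≠ a := by rintro rfl; omega
          exact ⟨Or.inr hx, by simpa [hxa] using hc⟩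
      rw [this]
      simp [h0, h1]

lemma uC_cons (t : List Int) (a : Int) :
    uC t = uC (a :: t) + (if t.count a = 1 then 1 else if t.count a = 0 then -1 else 0) := by
  have h : uC (a :: t) = uC (t ++ [a]) := uC_perm (List.perm_append_singleton a t).symm
  rw [h, uC_append_singleton]
  split_ifs <;> omega

lemma swuWindow_eq (w : List Int) : swuWindow w = uC w := by
  unfold swuWindow
  rw [PySem.Dict.foldl_insert_getD_add_one_eq_counter]
  rw [PySem.List.foldl_ite_add_one]
  simp only [PySem.Dict.values, PySem.Dict.items_counter, List.map_map, List.countP_map]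
  have h1 : ((PySem.Set.ofList w).countP fun x => decide (((w.count x : Int)) = 1))
      = (w.toFinset.filter (fun x => w.count x = 1)).card := by
    rw [List.countP_eq_length_filter]
    have hnd : ((PySem.Set.ofList w).filter (fun x => decide ((w.count x : Int) = 1))).Nodup :=
      (PySem.Set.nodup_ofList w).filter _
    rw [← List.toFinset_card_of_nodup hnd]
    congr 1
    ext x
    simp only [List.mem_toFinset, List.mem_filter, PySem.Set.mem_ofList, Finset.mem_filter,
      decide_eq_true_eq]
    constructor
    · rintro ⟨hx, hc⟩; exact ⟨hx, by exact_mod_cast hc⟩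
    · rintro ⟨hx, hc⟩; exact ⟨hx, by exact_mod_cast hc⟩
  unfold uC
  rw [← h1]
  rw [zero_add]
  congr 1

-- invariant of A's initialisation loop
lemma swuInit_loop (w : List Int) : ∀ (pref : List Int) (st : Int × PySem.Dict Int Int),
    (∀ x, st.2.getD x 0 = (pref.count x : Int)) →
    (∀ x, st.2.contains x = true ↔ x ∈ pref) →
    st.1 = uC pref →
    (∀ x, (w.foldl swuInit st).2.getD x 0 = ((pref ++ w).count x : Int)) ∧
    (∀ x, (w.foldl swuInit st).2.contains x = true ↔ x ∈ pref ++ w) ∧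
    (w.foldl swuInit st).1 = uC (pref ++ w) := by
  induction w with
  | nil => intro pref st h1 h2 h3; simpa using ⟨h1, h2, h3⟩
  | cons a rest ih =>
    intro pref st h1 h2 h3
    have hstep :
        (∀ x, (swuInit st a).2.getD x 0 = ((pref ++ [a]).count x : Int)) ∧
        (∀ x, (swuInit st a).2.contains x = true ↔ x ∈ pref ++ [a]) ∧
        (swuInit st a).1 = uC (pref ++ [a]) := by
      by_cases hc : st.2.contains a = false
      · have hbr : swuInit st a = (st.1 + 1, st.2.insert a 1) := by
          unfold swuInit; rw [if_pos hc]
        have ha : a ∉ pref := fun hm => by simp [(h2 a).mpr hm] at hc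
        have hcnt0 : pref.count a = 0 := List.count_eq_zero.mpr ha
        refine ⟨?_, ?_, ?_⟩
        · intro x
          simp only [hbr, PySem.Dict.getD_insert]
          by_cases hx : x = a
          · subst hx; simp [List.count_append, hcnt0]
          · have hax : ¬a = x := fun h => hx h.symm
            rw [if_neg hx]
            simp [List.count_append, List.count_cons, hx, hax, h1 x]
        · intro x
          simp only [hbr, PySem.Dict.contains_insert]
          by_cases hx : x = a
          · subst hx; simp
          · simp [hx, h2 x]
        · simp only [hbr, uC_append_singleton, hcnt0, h3]
          norm_num
      · have hc' : st.2.contains a = true := by simpa using hc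
        have hbr : swuInit st a
            = ((if st.2.getD a 0 = 1 then st.1 - 1 else st.1),
               st.2.insert a (st.2.getD a 0 + 1)) := by
          unfold swuInit; rw [if_neg (by simp [hc'])]
        have ha : a ∈ pref := (h2 a).mp hc'
        have hcntpos : 0 < pref.count a := List.count_pos_iff.mpr ha
        refine ⟨?_, ?_, ?_⟩
        · intro x
          simp only [hbr, PySem.Dict.getD_insert]
          by_cases hx : x = a
          · subst hx
            rw [if_pos rfl, h1]
            simp [List.count_append, List.count_cons]
          · have hax : ¬a = x := fun h => hx h.symm
            rw [if_neg hx]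
            simp [List.count_append, List.count_cons, hx, hax, h1 x]
        · intro x
          simp only [hbr, PySem.Dict.contains_insert]
          by_cases hx : x = a
          · subst hx; simp
          · simp [hx, h2 x]
        · simp only [hbr, uC_append_singleton, h3, h1 a]
          split_ifs <;> omega
    have := ih (pref ++ [a]) (swuInit st a) hstep.1 hstep.2.1 hstep.2.2
    simpa [List.append_assoc] using this

lemma dict_getD_of_not_contains (d : PySem.Dict Int Int) (x : Int)
    (h : d.contains x = false) : d.getD x 0 = 0 := by
  rw [PySem.Dict.contains_eq_isSome_get?] at h
  have hn : d.get? x = none := by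
    cases hh : d.get? x with
    | none => rfl
    | some v => rw [hh] at h; simp at h
  simp [PySem.Dict.getD, hn]


-- one step of A's sliding loop
lemma swuStep_step (nums : List Int) (k i : Int) (hk : 1 ≤ k) (hki : k ≤ i)
    (hin : i < (nums.length : Int)) (ret u : Int) (di : PySem.Dict Int Int)
    (hdi : ∀ x, di.getD x 0 = ((swuWin nums k i).count x : Int))
    (hu : u = uC (swuWin nums k i)) :
    (swuStep nums k (ret, u, di) i).1 = ret + uC (swuWin nums k (i + 1)) ∧
    (swuStep nums k (ret, u, di) i).2.1 = uC (swuWin nums k (i + 1)) ∧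
    (∀ x, (swuStep nums k (ret, u, di) i).2.2.getD x 0
      = ((swuWin nums k (i + 1)).count x : Int)) := by
  have hik0 : (0:Int) ≤ i - k := by omega
  have hi0 : (0:Int) ≤ i := by omega
  -- abbreviations
  set a : Nat := (i - k).toNat with ha
  set b : Nat := i.toNat with hb
  have hab : a + 1 ≤ b := by omega
  have hbn : b < nums.length := by omega
  have han : a < nums.length := by omega
  -- element values
  have hprev : PySem.List.pyGetD nums (i - k) 0 = nums[a] :=
    PySem.List.pyGetD_eq_getElem nums 0 hik0 (by omega)
  have hv : PySem.List.pyGetD nums i 0 = nums[b] :=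
    PySem.List.pyGetD_eq_getElem nums 0 hi0 (by omega)
  -- window decompositions
  have htoNat1 : (i - k + 1).toNat = a + 1 := by omega
  have htoNat2 : (i + 1).toNat = b + 1 := by omega
  set t : List Int := List.take (b - (a + 1)) (List.drop (a + 1) nums) with ht
  have hwin : swuWin nums k i = nums[a] :: t := by
    unfold swuWin
    rw [PySem.List.slice_toNat nums hik0 hi0, ← ha, ← hb]
    rw [List.drop_eq_getElem_cons han]
    have : b - a = (b - (a + 1)) + 1 := by omega
    rw [this, List.take_succ_cons]
  have hwin' : swuWin nums k (i + 1) = t ++ [nums[b]] := by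
    unfold swuWin
    have h1 : i + 1 - k = i - k + 1 := by ring
    rw [h1, PySem.List.slice_toNat nums (by omega) (by omega), htoNat1, htoNat2]
    have h2 : b + 1 - (a + 1) = (b - (a + 1)) + 1 := by omega
    rw [h2, List.take_add_one]
    congr 1
    have h3 : (List.drop (a + 1) nums)[b - (a + 1)]? = some nums[b] := by
      rw [List.getElem?_drop]
      have : a + 1 + (b - (a + 1)) = b := by omega
      rw [this, List.getElem?_eq_getElem hbn]
    rw [h3]
    rfl
  -- the decremented dict counts t
  have hdi1 : ∀ x, (di.insert nums[a] (di.getD nums[a] 0 - 1)).getD x 0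
      = (t.count x : Int) := by
    intro x
    rw [PySem.Dict.getD_insert]
    by_cases hx : x = nums[a]
    · subst hx
      rw [if_pos rfl, hdi, hwin]
      simp [List.count_cons]
    · rw [if_neg hx, hdi, hwin]
      have hax : ¬nums[a] = x := fun h => hx h.symm
      simp [List.count_cons, hax]
  -- uniques after the removal step
  have hu1 : (if (di.insert nums[a] (di.getD nums[a] 0 - 1)).getD nums[a] 0 = 1 then u + 1
      else if (di.insert nums[a] (di.getD nums[a] 0 - 1)).getD nums[a] 0 = 0 then u - 1 else u)
      = uC t := by
    rw [hdi1, hu, hwin, uC_cons t nums[a]]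
    split_ifs <;> omega
  -- now the two branches of the insertion step
  have hcond : ((di.insert nums[a] (di.getD nums[a] 0 - 1)).contains nums[b] = false ∨
      (di.insert nums[a] (di.getD nums[a] 0 - 1)).getD nums[b] 0 = 0) ↔ t.count nums[b] = 0 := by
    constructor
    · rintro (h | h)
      · have := dict_getD_of_not_contains _ _ h
        rw [hdi1] at this; exact_mod_cast this
      · rw [hdi1] at h; exact_mod_cast h
    · intro h
      right
      rw [hdi1, h]; rfl
  by_cases hz : t.count nums[b] = 0
  · have hres : swuStep nums k (ret, u, di) i
        = (ret + (uC t + 1), uC t + 1,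
           (di.insert nums[a] (di.getD nums[a] 0 - 1)).insert nums[b] 1) := by
      unfold swuStep
      simp only [hprev, hv]
      rw [if_pos (hcond.mpr hz), hu1]
    rw [hres, hwin', uC_append_singleton, if_pos hz]
    refine ⟨by ring_nf, by ring_nf, ?_⟩
    intro x
    rw [PySem.Dict.getD_insert]
    by_cases hx : x = nums[b]
    · subst hx; rw [if_pos rfl]
      simp [List.count_append, hz]
    · rw [if_neg hx, hdi1]
      have hax : ¬nums[b] = x := fun h => hx h.symm
      simp [List.count_append, List.count_cons, hax]
  · have hres : swuStep nums k (ret, u, di) i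
        = (ret + (if (t.count nums[b] : Int) = 1 then uC t - 1 else uC t),
           (if (t.count nums[b] : Int) = 1 then uC t - 1 else uC t),
           (di.insert nums[a] (di.getD nums[a] 0 - 1)).insert nums[b]
             ((t.count nums[b] : Int) + 1)) := by
      unfold swuStep
      simp only [hprev, hv]
      rw [if_neg (by rw [hcond]; exact hz), hu1, hdi1]
    have huval : (if (t.count nums[b] : Int) = 1 then uC t - 1 else uC t)
        = uC (t ++ [nums[b]]) := by
      rw [uC_append_singleton, if_neg hz]
      split_ifs <;> omega
    rw [hres, hwin', huval]
    refine ⟨rfl, rfl, ?_⟩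
    intro x
    rw [PySem.Dict.getD_insert]
    by_cases hx : x = nums[b]
    · subst hx; rw [if_pos rfl]
      simp [List.count_append, List.count_cons]
    · rw [if_neg hx, hdi1]
      have hax : ¬nums[b] = x := fun h => hx h.symm
      simp [List.count_append, List.count_cons, hax]

-- A's sliding loop sums uC over the remaining windows
lemma swuStep_loop (nums : List Int) (k : Int) (hk : 1 ≤ k) :
    ∀ (m : Nat) (i : Int), i = (nums.length : Int) - m → k ≤ i →
    ∀ (ret u : Int) (di : PySem.Dict Int Int),
    (∀ x, di.getD x 0 = ((swuWin nums k i).count x : Int)) →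
    u = uC (swuWin nums k i) →
    ((PySem.List.pyRange i (nums.length : Int) 1).foldl (swuStep nums k) (ret, u, di)).1
      = ret + ((PySem.List.pyRange i (nums.length : Int) 1).map
          (fun j => uC (swuWin nums k (j + 1)))).sum := by
  intro m
  induction m with
  | zero =>
    intro i hi hki ret u di hdi hu
    have : (nums.length : Int) ≤ i := by omega
    rw [PySem.List.pyRange_one_eq_nil this]
    simp
  | succ m ih =>
    intro i hi hki ret u di hdi hu
    by_cases hin : i < (nums.length : Int)
    · rw [PySem.List.pyRange_one_cons hin]
      simp only [List.foldl_cons, List.map_cons, List.sum_cons]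
      obtain ⟨h1, h2, h3⟩ := swuStep_step nums k i hk hki hin ret u di hdi hu
      have hfold := ih (i + 1) (by omega) (by omega)
        (swuStep nums k (ret, u, di) i).1 (swuStep nums k (ret, u, di) i).2.1
        (swuStep nums k (ret, u, di) i).2.2 h3 h2
      have hpair : swuStep nums k (ret, u, di) i
          = ((swuStep nums k (ret, u, di) i).1, (swuStep nums k (ret, u, di) i).2.1,
             (swuStep nums k (ret, u, di) i).2.2) := rfl
      rw [hpair] at hfold ⊢
      rw [hfold, h1]
      ring
    · have : (nums.length : Int) ≤ i := by omega
      rw [PySem.List.pyRange_one_eq_nil this]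
      simp


lemma map_pyGetD_take (nums : List Int) (ws : Int) (h0 : 0 ≤ ws)
    (h1 : ws ≤ (nums.length : Int)) :
    (PySem.List.pyRange 0 ws 1).map (fun i => PySem.List.pyGetD nums i 0)
      = nums.take ws.toNat := by
  have hlen : (((nums.take ws.toNat).length : Nat) : Int) = ws := by
    simp [List.length_take]; omega
  have hr : PySem.List.pyRange 0 ws 1
      = PySem.List.pyRange 0 (((nums.take ws.toNat).length : Nat) : Int) 1 := by rw [hlen]
  conv_rhs => rw [← PySem.List.map_pyGetD_pyRange_zero' (nums.take ws.toNat) 0]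
  rw [hr]
  apply List.map_congr_left
  intro i hi
  rw [PySem.List.mem_pyRange_one] at hi
  have hi0 : 0 ≤ i := hi.1
  have hiw : i < ws := by omega
  rw [PySem.List.pyGetD_eq_getElem nums 0 hi0 (by omega),
      PySem.List.pyGetD_eq_getElem (nums.take ws.toNat) 0 hi0 (by omega)]
  rw [List.getElem_take]

lemma swuWin_base (nums : List Int) (k : Int) (hk : 0 ≤ k)
    (hkn : k ≤ (nums.length : Int)) :
    swuWin nums k k = nums.take k.toNat := by
  unfold swuWin
  rw [sub_self, PySem.List.slice_toNat nums le_rfl hk]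
  simp

lemma uC_nil : uC [] = 0 := by simp [uC]

lemma swuInit_result (nums : List Int) (ws : Int) (h0 : 0 ≤ ws)
    (h1 : ws ≤ (nums.length : Int)) :
    (∀ x, (((nums.take ws.toNat).foldl swuInit
        ((0 : Int), (PySem.Dict.empty : PySem.Dict Int Int))).2).getD x 0
      = ((nums.take ws.toNat).count x : Int)) ∧
    ((nums.take ws.toNat).foldl swuInit
        ((0 : Int), (PySem.Dict.empty : PySem.Dict Int Int))).1
      = uC (nums.take ws.toNat) := by
  have h := swuInit_loop (nums.take ws.toNat) [] ((0 : Int), PySem.Dict.empty)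
      (by intro x; simp [PySem.Dict.getD_empty])
      (by intro x; simp [PySem.Dict.contains_empty])
      (by simp [uC_nil])
  simpa using ⟨h.1, h.2.2⟩

lemma A_eval (nums : List Int) (k : Int) (hk : 1 ≤ k) :
    slidingWindowUniqueElementsSum nums k
      = uC (nums.take (if k > (nums.length : Int) then (nums.length : Int) else k).toNat)
        + ((PySem.List.pyRange k (nums.length : Int) 1).map
            (fun j => uC (swuWin nums k (j + 1)))).sum := by
  have hws0 : 0 ≤ (if k > (nums.length : Int) then (nums.length : Int) else k) := by
    split_ifs <;> omega
  have hwsn : (if k > (nums.length : Int) then (nums.length : Int) else k)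
      ≤ (nums.length : Int) := by split_ifs <;> omega
  simp only [slidingWindowUniqueElementsSum]
  have hfold1 : (PySem.List.pyRange 0 (if k > (nums.length : Int) then (nums.length : Int) else k) 1).foldl
      (fun st i => swuInit st (PySem.List.pyGetD nums i 0)) ((0 : Int), PySem.Dict.empty)
      = (nums.take (if k > (nums.length : Int) then (nums.length : Int) else k).toNat).foldl
          swuInit ((0 : Int), PySem.Dict.empty) := by
    rw [← map_pyGetD_take nums _ hws0 hwsn, List.foldl_map]
  rw [hfold1]
  obtain ⟨hdi, hu⟩ := swuInit_result nums _ hws0 hwsn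
  by_cases hlt : k < (nums.length : Int)
  · have hws : (if k > (nums.length : Int) then (nums.length : Int) else k) = k := by
      rw [if_neg (by omega)]
    rw [hws] at hdi hu ⊢
    rw [swuStep_loop nums k hk (((nums.length : Int) - k).toNat) k (by omega) le_rfl
        _ _ _ (by rw [swuWin_base nums k (by omega) (by omega)]; exact hdi)
        (by rw [swuWin_base nums k (by omega) (by omega)]; exact hu), hu]
  · have hnil : PySem.List.pyRange k (nums.length : Int) 1 = [] :=
      PySem.List.pyRange_one_eq_nil (by omega)
    rw [hnil]
    simpa using hu

lemma B_eval (nums : List Int) (k : Int) :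
    slidingWindowUniqueElementsSum_alt nums k
      = ((PySem.List.pyRange 0 ((nums.length : Int)
            - (if k ≤ (nums.length : Int) then k else (nums.length : Int)) + 1) 1).map
          (fun s => uC (PySem.List.slice nums (some s)
            (some (s + (if k ≤ (nums.length : Int) then k else (nums.length : Int))))))).sum := by
  simp only [slidingWindowUniqueElementsSum_alt]
  rw [PySem.List.foldl_add _ (fun s => swuWindow (PySem.List.slice nums (some s)
      (some (s + (if k ≤ (nums.length : Int) then k else (nums.length : Int)))))), zero_add]
  congr 1
  apply List.map_congr_left
  intro s _
  rw [swuWindow_eq]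

lemma slice_head_window (nums : List Int) (k : Int) (hk : 0 ≤ k) :
    PySem.List.slice nums (some 0) (some (0 + k)) = nums.take k.toNat := by
  rw [zero_add, PySem.List.slice_toNat nums le_rfl hk]
  simp

-- ===== VERDICT (by name: the statement is the Claim_ definition above) =====
theorem slidingWindowUniqueElementsSum_spec : Claim_equal_slidingWindowUniqueElementsSum := by
  intro nums k _hdom hpre
  unfold Spec_slidingWindowUniqueElementsSum
  rcases hpre with hk | ⟨hnil, hk0⟩
  · rw [A_eval nums k hk, B_eval nums k]
    by_cases hlt : k < (nums.length : Int)
    · have hws : (if k > (nums.length : Int) then (nums.length : Int) else k) = k := by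
        rw [if_neg (by omega)]
      have hwl : (if k ≤ (nums.length : Int) then k else (nums.length : Int)) = k := by
        rw [if_pos (by omega)]
      rw [hws, hwl]
      rw [PySem.List.pyRange_one_append 0 1 ((nums.length : Int) - k + 1) (by omega) (by omega)]
      rw [List.map_append, List.sum_append]
      have h01 : PySem.List.pyRange 0 1 1 = [0] := by
        rw [PySem.List.pyRange_one_cons (by omega), PySem.List.pyRange_one_eq_nil (by omega)]
      rw [h01]
      simp only [List.map_cons, List.map_nil, List.sum_cons, List.sum_nil]
      have htail : ((PySem.List.pyRange k (nums.length : Int) 1).map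
            (fun j => uC (swuWin nums k (j + 1)))).sum
          = ((PySem.List.pyRange 1 ((nums.length : Int) - k + 1) 1).map
              (fun s => uC (PySem.List.slice nums (some s) (some (s + k))))).sum := by
        rw [PySem.List.pyRange_one 1 ((nums.length : Int) - k + 1),
            PySem.List.pyRange_one k (nums.length : Int)]
        have hlen : ((nums.length : Int) - k + 1 - 1) = (nums.length : Int) - k := by ring
        rw [hlen]
        simp only [List.map_map]
        congr 1
        apply List.map_congr_left
        intro t _
        simp only [Function.comp_apply]
        unfold swuWin
        have e1 : k + (t : Int) + 1 - k = 1 + (t : Int) := by ring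
        have e2 : k + (t : Int) + 1 = 1 + (t : Int) + k := by ring
        rw [e1, e2]
      rw [slice_head_window nums k (by omega), htail]
      ring
    · have hws : (if k > (nums.length : Int) then (nums.length : Int) else k)
          = (nums.length : Int) := by split_ifs <;> omega
      have hwl : (if k ≤ (nums.length : Int) then k else (nums.length : Int))
          = (nums.length : Int) := by split_ifs <;> omega
      rw [hws, hwl]
      have hnil : PySem.List.pyRange k (nums.length : Int) 1 = [] :=
        PySem.List.pyRange_one_eq_nil (by omega)
      have hsub : (nums.length : Int) - (nums.length : Int) + 1 = 1 := by ring
      rw [hnil, hsub]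
      have h01 : PySem.List.pyRange 0 1 1 = [0] := by
        rw [PySem.List.pyRange_one_cons (by omega), PySem.List.pyRange_one_eq_nil (by omega)]
      rw [h01]
      simp only [List.map_cons, List.map_nil, List.sum_cons, List.sum_nil, List.map_nil]
      rw [slice_head_window nums (nums.length : Int) (by omega)]
  · subst hnil; subst hk0
    decide
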